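-- pv_equiv track=rewrite | github.com/okahaya/SimulatedQuantumAnnealing | TooDirtyFile/GraphColoring/GraphVisualizer.py | broken
-- ===== SOURCE A (Python) =====
-- def broken(i,k,result,h,w):
--     i = i*w + k
--     colors = len(result[0])
--     cnt = 0
--     for col in range(colors):
--         if result[i][col] == 1:
--             if i>=w:
--                 if result[i-w][col] == 1:
--                     return "D"
--             if i%w != 0:
--                 if result[i-1][col] == 1:
--                     return "D"
--             if i%w != w-1:
--                 if result[i+1][col] == 1:
--                     return "D"
--             if i<h*w-w:
--                 if result[i+w][col] == 1:
--                     return "D"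
--             cnt += 1
--     if cnt != 1:
--         return "N"
--     return None
-- ===== SOURCE B (Python) =====
-- def broken(i, k, result, h, w):
--     idx = i * w + k
--     colors = len(result[0])
--     mine = {c for c in range(colors) if result[idx][c] == 1}
--     if mine:
--         neighbor_colors = set()
--         if idx >= w:
--             neighbor_colors.update(c for c in range(colors) if result[idx - w][c] == 1)
--         if idx % w != 0:
--             neighbor_colors.update(c for c in range(colors) if result[idx - 1][c] == 1)
--         if idx % w != w - 1:
--             neighbor_colors.update(c for c in range(colors) if result[idx + 1][c] == 1)
--         if idx < h * w - w:
--             neighbor_colors.update(c for c in range(colors) if result[idx + w][c] == 1)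
--         if not mine.isdisjoint(neighbor_colors):
--             return "D"
--     return None if len(mine) == 1 else "N"
-- ===== Notes on version B (the rewrite author's own statement) =====
-- stated objective: alternative
-- what changed: B is set-based and staged: it builds the set of colors set on the cell, then accumulates the FULL set of colors used by any valid neighbor (scanning every color of each neighbor row, not probing per own color), and decides 'D' with one set-disjointness test, where A interleaves four guarded single-cell probes inside its per-color loop and short-circuits; Pre_ excludes inputs where an executed indexing step is out of range or w=0 is divided by: there A raises, or A short-circuits to 'D' before the bad access while B's fuller scan raises, an artefact of scan order on malformed grids.
-- outside the precondition, e.g. on broken(0, 0, [[1, 1], [0], [1, 0], [0, 0]], 2, 2): A returns 'D', B raises IndexError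
import Mathlib
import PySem

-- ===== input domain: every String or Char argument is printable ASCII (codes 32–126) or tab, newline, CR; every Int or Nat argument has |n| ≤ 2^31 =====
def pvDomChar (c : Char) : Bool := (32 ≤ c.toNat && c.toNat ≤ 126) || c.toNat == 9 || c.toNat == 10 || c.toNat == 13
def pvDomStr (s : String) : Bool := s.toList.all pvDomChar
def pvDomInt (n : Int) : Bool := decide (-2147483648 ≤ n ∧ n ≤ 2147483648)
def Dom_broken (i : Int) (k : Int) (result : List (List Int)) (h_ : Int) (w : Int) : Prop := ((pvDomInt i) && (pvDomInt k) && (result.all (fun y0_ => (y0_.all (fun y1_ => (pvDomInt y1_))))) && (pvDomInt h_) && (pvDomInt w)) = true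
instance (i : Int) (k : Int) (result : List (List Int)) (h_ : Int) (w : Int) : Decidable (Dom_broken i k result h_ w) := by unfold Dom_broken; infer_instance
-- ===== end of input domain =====

-- B re-decomposes A's interleaved per-color probing into set algebra: the cell's color set, the full set of colors used by any valid neighbor, one disjointness test, then a count (objective: alternative).


-- ===== PORT A =====
-- result[r][c]; exact under Pre_ (all accesses in range there)
def pvCellA (result : List (List Int)) (r c : Int) : Int :=
  PySem.List.pyGetD (PySem.List.pyGetD result r []) c 0

def pvGoA (idx : Int) (result : List (List Int)) (h_ : Int) (w : Int) :
    List Int → Int → Option String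
  | [], cnt => if cnt ≠ 1 then some "N" else none
  | col :: rest, cnt =>
    if pvCellA result idx col = 1 then
      if idx ≥ w ∧ pvCellA result (idx - w) col = 1 then some "D"
      else if PySem.Int.mod idx w ≠ 0 ∧ pvCellA result (idx - 1) col = 1 then some "D"
      else if PySem.Int.mod idx w ≠ w - 1 ∧ pvCellA result (idx + 1) col = 1 then some "D"
      else if idx < h_ * w - w ∧ pvCellA result (idx + w) col = 1 then some "D"
      else pvGoA idx result h_ w rest (cnt + 1)
    else pvGoA idx result h_ w rest cnt

def broken (i : Int) (k : Int) (result : List (List Int)) (h_ : Int) (w : Int) : Option String :=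
  let i' := i * w + k
  let colors : Int := ((PySem.List.pyGetD result 0 []).length : Int)
  pvGoA i' result h_ w (PySem.List.pyRange 0 colors 1) 0

-- ===== PORT B =====
def pvCellB (result : List (List Int)) (r c : Int) : Int :=
  PySem.List.pyGetD (PySem.List.pyGetD result r []) c 0

-- the generator '(c for c in range(colors) if result[n][c] == 1)' fed to set.update
def pvFilt (result : List (List Int)) (colors n : Int) : List Int :=
  (PySem.List.pyRange 0 colors 1).filter (fun c => decide (pvCellB result n c = 1))

-- neighbor_colors: starts empty, each of the four guarded updates adds one neighbor's colors
def pvNbc (idx : Int) (result : List (List Int)) (h_ w colors : Int) : PySem.Set Int :=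
  let s1 := if idx ≥ w then PySem.Set.update PySem.Set.empty (pvFilt result colors (idx - w)) else PySem.Set.empty
  let s2 := if PySem.Int.mod idx w ≠ 0 then PySem.Set.update s1 (pvFilt result colors (idx - 1)) else s1
  let s3 := if PySem.Int.mod idx w ≠ w - 1 then PySem.Set.update s2 (pvFilt result colors (idx + 1)) else s2
  if idx < h_ * w - w then PySem.Set.update s3 (pvFilt result colors (idx + w)) else s3

def broken_alt (i : Int) (k : Int) (result : List (List Int)) (h_ : Int) (w : Int) : Option String :=
  let idx := i * w + k
  let colors : Int := ((PySem.List.pyGetD result 0 []).length : Int)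
  let mine : PySem.Set Int := PySem.Set.ofList (pvFilt result colors idx)
  if mine ≠ [] then
    if PySem.Set.isdisjoint mine (pvNbc idx result h_ w colors) = false then some "D"
    else if PySem.Set.len mine = 1 then none else some "N"
  else if PySem.Set.len mine = 1 then none else some "N"

-- ===== PRECONDITION & SPEC =====
-- row index n valid (Python ±range) and the row long enough for every col in range(colors)
def pvOk (result : List (List Int)) (n : Int) (colors : Nat) : Prop :=
  PySem.Raise.InRange result.length n ∧ colors ≤ (PySem.List.pyGetD result n []).length

-- Pre_ excludes inputs on which an executed indexing step is out of range or w = 0 is divided by: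
-- there A raises (IndexError/ZeroDivisionError), or A short-circuits to "D" before reaching the
-- bad access while B's fuller neighbor scan raises, an artefact of scan order on malformed grids.
def Pre_broken (i : Int) (k : Int) (result : List (List Int)) (h_ : Int) (w : Int) : Prop :=
  result ≠ [] ∧
  (let idx := i * w + k
   let colors := (PySem.List.pyGetD result 0 []).length
   let row := PySem.List.pyGetD result idx []
   (0 < colors → PySem.Raise.InRange result.length idx ∧ colors ≤ row.length) ∧
   ((1 : Int) ∈ row.take colors →
     w ≠ 0 ∧
     (idx ≥ w → pvOk result (idx - w) colors) ∧
     (PySem.Int.mod idx w ≠ 0 → pvOk result (idx - 1) colors) ∧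
     (PySem.Int.mod idx w ≠ w - 1 → pvOk result (idx + 1) colors) ∧
     (idx < h_ * w - w → pvOk result (idx + w) colors)))
instance (i : Int) (k : Int) (result : List (List Int)) (h_ : Int) (w : Int) : Decidable (Pre_broken i k result h_ w) := by unfold Pre_broken pvOk; infer_instance

def pvWitness_broken : Int × Int × List (List Int) × Int × Int := (0, 0, [[1]], 1, 1)

def Spec_broken (i : Int) (k : Int) (result : List (List Int)) (h_ : Int) (w : Int) (out : Option String) : Prop := out = broken_alt i k result h_ w
instance (i : Int) (k : Int) (result : List (List Int)) (h_ : Int) (w : Int) (out : Option String) : Decidable (Spec_broken i k result h_ w out) := by unfold Spec_broken; infer_instance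

-- ===== CLAIM (what is proved, stated in full; the proofs are below) =====
def Claim_equal_broken : Prop := ∀ (i : Int) (k : Int) (result : List (List Int)) (h_ : Int) (w : Int), Dom_broken i k result h_ w → Pre_broken i k result h_ w → Spec_broken i k result h_ w (broken i k result h_ w)

-- ===== LEMMAS AND PROOFS =====

-- per-color "some valid neighbor has this color" test, matching A's four guards
def pvDhit (idx : Int) (result : List (List Int)) (h_ : Int) (w : Int) (col : Int) : Bool :=
  (decide (idx ≥ w) && decide (pvCellA result (idx - w) col = 1)) ||
  (decide (PySem.Int.mod idx w ≠ 0) && decide (pvCellA result (idx - 1) col = 1)) ||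
  (decide (PySem.Int.mod idx w ≠ w - 1) && decide (pvCellA result (idx + 1) col = 1)) ||
  (decide (idx < h_ * w - w) && decide (pvCellA result (idx + w) col = 1))

theorem pvGoA_eq (idx : Int) (result : List (List Int)) (h_ : Int) (w : Int)
    (cols : List Int) (cnt : Int) :
    pvGoA idx result h_ w cols cnt =
      if cols.any (fun col => decide (pvCellA result idx col = 1) && pvDhit idx result h_ w col)
      then some "D"
      else if cnt + ((cols.filter (fun col => decide (pvCellA result idx col = 1))).length : Int) ≠ 1
      then some "N" else none := by
  induction cols generalizing cnt with
  | nil => simp [pvGoA]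
  | cons col rest ih =>
    by_cases hc : pvCellA result idx col = 1
    · by_cases hd : pvDhit idx result h_ w col = true
      · have hL : pvGoA idx result h_ w (col :: rest) cnt = some "D" := by
          rw [pvGoA, if_pos hc]
          split_ifs with e1 e2 e3 e4
          · rfl
          · rfl
          · rfl
          · rfl
          · exfalso
            unfold pvDhit at hd
            simp only [Bool.or_eq_true, Bool.and_eq_true, decide_eq_true_eq] at hd
            tauto
        have hhit : (decide (pvCellA result idx col = 1) && pvDhit idx result h_ w col) = true := by
          rw [hd, decide_eq_true hc, Bool.true_and]
        rw [hL, List.any_cons, hhit, Bool.true_or, if_pos rfl]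
      · have hdf : pvDhit idx result h_ w col = false := by
          revert hd; cases pvDhit idx result h_ w col <;> simp
        have e1 : ¬ (idx ≥ w ∧ pvCellA result (idx - w) col = 1) := by
          rintro ⟨a, b⟩
          have : pvDhit idx result h_ w col = true := by unfold pvDhit; simp [a, b]
          rw [hdf] at this; exact Bool.false_ne_true this
        have e2 : ¬ (PySem.Int.mod idx w ≠ 0 ∧ pvCellA result (idx - 1) col = 1) := by
          rintro ⟨a, b⟩
          have : pvDhit idx result h_ w col = true := by unfold pvDhit; simp [a, b]
          rw [hdf] at this; exact Bool.false_ne_true this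
        have e3 : ¬ (PySem.Int.mod idx w ≠ w - 1 ∧ pvCellA result (idx + 1) col = 1) := by
          rintro ⟨a, b⟩
          have : pvDhit idx result h_ w col = true := by unfold pvDhit; simp [a, b]
          rw [hdf] at this; exact Bool.false_ne_true this
        have e4 : ¬ (idx < h_ * w - w ∧ pvCellA result (idx + w) col = 1) := by
          rintro ⟨a, b⟩
          have : pvDhit idx result h_ w col = true := by unfold pvDhit; simp [a, b]
          rw [hdf] at this; exact Bool.false_ne_true this
        have hnohit : (decide (pvCellA result idx col = 1) && pvDhit idx result h_ w col) = false := by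
          rw [hdf, Bool.and_false]
        have hdc : decide (pvCellA result idx col = 1) = true := decide_eq_true hc
        rw [pvGoA, if_pos hc, if_neg e1, if_neg e2, if_neg e3, if_neg e4, ih]
        rw [List.any_cons, hnohit, Bool.false_or, List.filter_cons, if_pos hdc,
          List.length_cons]
        refine if_congr Iff.rfl rfl (if_congr ?_ rfl rfl)
        push_cast
        omega
    · have hdc : decide (pvCellA result idx col = 1) = false := decide_eq_false hc
      rw [pvGoA, if_neg hc, ih]
      simp only [List.any_cons, List.filter_cons, hdc, Bool.false_and, Bool.false_or,
        Bool.false_eq_true, if_false]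

theorem pvMem_filt (result : List (List Int)) (colors n c : Int) :
    c ∈ pvFilt result colors n ↔ c ∈ PySem.List.pyRange 0 colors 1 ∧ pvCellB result n c = 1 := by
  simp [pvFilt, List.mem_filter]

theorem pvMem_nbc (idx : Int) (result : List (List Int)) (h_ w colors c : Int) :
    c ∈ pvNbc idx result h_ w colors ↔
      (idx ≥ w ∧ c ∈ pvFilt result colors (idx - w)) ∨
      (PySem.Int.mod idx w ≠ 0 ∧ c ∈ pvFilt result colors (idx - 1)) ∨
      (PySem.Int.mod idx w ≠ w - 1 ∧ c ∈ pvFilt result colors (idx + 1)) ∨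
      (idx < h_ * w - w ∧ c ∈ pvFilt result colors (idx + w)) := by
  unfold pvNbc
  split_ifs <;>
    simp only [PySem.Set.mem_update, PySem.Set.empty, List.not_mem_nil, false_or] <;> tauto

theorem pvNodup_filt (result : List (List Int)) (colors n : Int) :
    (pvFilt result colors n).Nodup :=
  (PySem.List.nodup_pyRange_one 0 colors).filter _

-- the any over A's per-color loop ⟺ B's "mine nonempty and not disjoint from neighbor colors"
theorem pvAny_iff (idx : Int) (result : List (List Int)) (h_ w colors : Int) :
    ((PySem.List.pyRange 0 colors 1).any
        (fun col => decide (pvCellA result idx col = 1) && pvDhit idx result h_ w col)) = true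
      ↔ (pvFilt result colors idx ≠ [] ∧
         PySem.Set.isdisjoint (pvFilt result colors idx) (pvNbc idx result h_ w colors) = false) := by
  constructor
  · intro hx
    simp only [List.any_eq_true, Bool.and_eq_true, decide_eq_true_eq] at hx
    obtain ⟨col, hcr, hc1, hdh⟩ := hx
    have hcm : col ∈ pvFilt result colors idx := (pvMem_filt _ _ _ _).mpr ⟨hcr, hc1⟩
    refine ⟨List.ne_nil_of_mem hcm, ?_⟩
    rw [← Bool.not_eq_true, PySem.Set.isdisjoint_iff]
    intro hall
    apply hall col hcm
    rw [pvMem_nbc]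
    unfold pvDhit at hdh
    simp only [Bool.or_eq_true, Bool.and_eq_true, decide_eq_true_eq] at hdh
    rcases hdh with ((⟨hg, hv⟩ | ⟨hg, hv⟩) | ⟨hg, hv⟩) | ⟨hg, hv⟩
    · exact Or.inl ⟨hg, (pvMem_filt _ _ _ _).mpr ⟨hcr, hv⟩⟩
    · exact Or.inr (Or.inl ⟨hg, (pvMem_filt _ _ _ _).mpr ⟨hcr, hv⟩⟩)
    · exact Or.inr (Or.inr (Or.inl ⟨hg, (pvMem_filt _ _ _ _).mpr ⟨hcr, hv⟩⟩))
    · exact Or.inr (Or.inr (Or.inr ⟨hg, (pvMem_filt _ _ _ _).mpr ⟨hcr, hv⟩⟩))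
  · rintro ⟨-, hdis⟩
    rw [← Bool.not_eq_true, PySem.Set.isdisjoint_iff] at hdis
    push_neg at hdis
    obtain ⟨col, hcm, hcn⟩ := hdis
    obtain ⟨hcr, hc1⟩ := (pvMem_filt _ _ _ _).mp hcm
    rw [pvMem_nbc] at hcn
    simp only [List.any_eq_true, Bool.and_eq_true, decide_eq_true_eq]
    refine ⟨col, hcr, hc1, ?_⟩
    unfold pvDhit
    rcases hcn with ⟨hg, hv⟩ | ⟨hg, hv⟩ | ⟨hg, hv⟩ | ⟨hg, hv⟩ <;>
      obtain ⟨-, hv1⟩ := (pvMem_filt _ _ _ _).mp hv <;>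
      simp only [show pvCellB = pvCellA from rfl] at hv1 <;> simp [hg, hv1]

theorem broken_eq_alt (i : Int) (k : Int) (result : List (List Int)) (h_ : Int) (w : Int) :
    broken i k result h_ w = broken_alt i k result h_ w := by
  have hnd := pvNodup_filt result ((PySem.List.pyGetD result 0 []).length : Int) (i * w + k)
  have hof : PySem.Set.ofList (pvFilt result ((PySem.List.pyGetD result 0 []).length : Int) (i * w + k))
      = pvFilt result ((PySem.List.pyGetD result 0 []).length : Int) (i * w + k) :=
    PySem.Set.ofList_eq_self_of_nodup _ hnd
  have hA : broken i k result h_ w =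
      pvGoA (i * w + k) result h_ w
        (PySem.List.pyRange 0 ((PySem.List.pyGetD result 0 []).length : Int) 1) 0 := rfl
  have hB : broken_alt i k result h_ w =
      (if PySem.Set.ofList (pvFilt result ((PySem.List.pyGetD result 0 []).length : Int) (i * w + k)) ≠ [] then
        if PySem.Set.isdisjoint
            (PySem.Set.ofList (pvFilt result ((PySem.List.pyGetD result 0 []).length : Int) (i * w + k)))
            (pvNbc (i * w + k) result h_ w ((PySem.List.pyGetD result 0 []).length : Int)) = false then some "D"
        else if PySem.Set.len
            (PySem.Set.ofList (pvFilt result ((PySem.List.pyGetD result 0 []).length : Int) (i * w + k))) = 1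
          then none else some "N"
      else if PySem.Set.len
          (PySem.Set.ofList (pvFilt result ((PySem.List.pyGetD result 0 []).length : Int) (i * w + k))) = 1
        then none else some "N") := rfl
  rw [hA, pvGoA_eq, hB, hof]
  set colors : Int := ((PySem.List.pyGetD result 0 []).length : Int) with hcolors
  set F := pvFilt result colors (i * w + k) with hF
  have hFfil : F = (PySem.List.pyRange 0 colors 1).filter
      (fun col => decide (pvCellA result (i * w + k) col = 1)) := by
    rw [hF]; rfl
  by_cases hD : ((PySem.List.pyRange 0 colors 1).any
      (fun col => decide (pvCellA result (i * w + k) col = 1) && pvDhit (i * w + k) result h_ w col)) = true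
  · obtain ⟨hne, hdis⟩ := (pvAny_iff (i * w + k) result h_ w colors).mp hD
    rw [if_pos hD, if_pos hne, if_pos hdis]
  · rw [if_neg hD]
    have hlen : PySem.Set.len F = (F.length : Int) := rfl
    have htail :
        (if (0 : Int) + (((PySem.List.pyRange 0 colors 1).filter
            (fun col => decide (pvCellA result (i * w + k) col = 1))).length : Int) ≠ 1
         then some "N" else none) =
        (if PySem.Set.len F = 1 then (none : Option String) else some "N") := by
      rw [← hFfil, hlen]
      by_cases h1 : (F.length : Int) = 1
      · rw [if_neg (by omega : ¬ ((0 : Int) + (F.length : Int) ≠ 1)), if_pos h1]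
      · rw [if_pos (by omega : (0 : Int) + (F.length : Int) ≠ 1), if_neg h1]
    rw [htail]
    by_cases hne : F ≠ []
    · have hdis : PySem.Set.isdisjoint F (pvNbc (i * w + k) result h_ w colors) ≠ false := by
        intro hc
        exact hD ((pvAny_iff (i * w + k) result h_ w colors).mpr ⟨hne, hc⟩)
      rw [if_pos hne, if_neg hdis]
    · rw [if_neg hne]

-- ===== VERDICT (by name: the statement is the Claim_ definition above) =====
theorem broken_spec : Claim_equal_broken := by
  intro i k result h_ w _ _
  unfold Spec_broken
  exact broken_eq_alt i k result h_ w
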